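-- pv_equiv track=rewrite | github.com/venkat-0706/GFG | Difficulty: Medium/Max Xor Subarray of size K/max-xor-subarray-of-size-k.py | maxSubarrayXOR
-- ===== SOURCE A (Python) =====
-- def maxSubarrayXOR(arr, k):
--     n = len(arr)
--     curr_sum =0
--     for i in range(0,k):
--         curr_sum ^= arr[i]
--     max_sum = curr_sum
--     for i in range(k,n):
--         curr_sum ^= arr[i-k]
--         curr_sum ^= arr[i]
--         max_sum = max(max_sum , curr_sum)
--     return max_sum
-- ===== SOURCE B (Python) =====
-- def maxSubarrayXOR(arr, k):
--     n = len(arr)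
--     P = [0]
--     for x in arr:
--         P.append(P[-1] ^ x)
--     best = P[k] ^ P[0]
--     for i in range(1, n - k + 1):
--         best = max(best, P[i + k] ^ P[i])
--     return best
-- ===== Notes on version B (the rewrite author's own statement) =====
-- stated objective: alternative
-- what changed: B builds a prefix-XOR array once and takes the max of P[i+k]^P[i] over window starts, instead of A's rolling update that XORs the outgoing and incoming element into a running window value.
import Mathlib
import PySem

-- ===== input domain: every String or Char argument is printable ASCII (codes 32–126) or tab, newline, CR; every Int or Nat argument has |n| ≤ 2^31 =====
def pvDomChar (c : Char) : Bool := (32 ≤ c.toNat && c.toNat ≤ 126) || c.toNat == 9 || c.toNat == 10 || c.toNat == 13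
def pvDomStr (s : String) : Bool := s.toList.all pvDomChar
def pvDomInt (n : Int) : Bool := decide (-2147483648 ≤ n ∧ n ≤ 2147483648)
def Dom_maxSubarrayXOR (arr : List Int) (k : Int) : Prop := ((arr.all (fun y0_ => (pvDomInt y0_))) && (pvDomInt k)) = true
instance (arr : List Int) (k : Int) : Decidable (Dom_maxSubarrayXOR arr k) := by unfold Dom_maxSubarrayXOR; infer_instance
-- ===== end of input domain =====

-- B replaces A's rolling-window XOR update by a prefix-XOR array: window xor = P[i+k]^P[i]; alternative decomposition, same O(n) cost.


-- ===== PORT A =====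
def maxSubarrayXOR (arr : List Int) (k : Int) : Int :=
  let n : Int := arr.length
  let currSum := (PySem.List.pyRange 0 k 1).foldl
    (fun c i => PySem.Int.bxor c (PySem.List.pyGetD arr i 0)) 0
  let st := (PySem.List.pyRange k n 1).foldl
    (fun (st : Int × Int) i =>
      let c := PySem.Int.bxor (PySem.Int.bxor st.1 (PySem.List.pyGetD arr (i - k) 0))
                 (PySem.List.pyGetD arr i 0)
      (c, max st.2 c)) (currSum, currSum)
  st.2

-- ===== PORT B =====
def maxSubarrayXOR_alt (arr : List Int) (k : Int) : Int :=
  let n : Int := arr.length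
  let P := arr.foldl (fun P x => P ++ [PySem.Int.bxor (PySem.List.pyGetD P (-1) 0) x]) [0]
  let best := PySem.Int.bxor (PySem.List.pyGetD P k 0) (PySem.List.pyGetD P 0 0)
  (PySem.List.pyRange 1 (n - k + 1) 1).foldl
    (fun b i => max b (PySem.Int.bxor (PySem.List.pyGetD P (i + k) 0) (PySem.List.pyGetD P i 0))) best

-- ===== PRECONDITION & SPEC =====
-- Pre_ excludes exactly the inputs where A raises IndexError: k < 0 or k > len(arr).
def Pre_maxSubarrayXOR (arr : List Int) (k : Int) : Prop := 0 ≤ k ∧ k ≤ arr.length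
instance (arr : List Int) (k : Int) : Decidable (Pre_maxSubarrayXOR arr k) := by
  unfold Pre_maxSubarrayXOR; infer_instance
def pvWitness_maxSubarrayXOR : List Int × Int := ([9, 7, 2, 5], 2)

def Spec_maxSubarrayXOR (arr : List Int) (k : Int) (out : Int) : Prop := out = maxSubarrayXOR_alt arr k
instance (arr : List Int) (k : Int) (out : Int) : Decidable (Spec_maxSubarrayXOR arr k out) := by unfold Spec_maxSubarrayXOR; infer_instance

-- ===== CLAIM (what is proved, stated in full; the proofs are below) =====
def Claim_equal_maxSubarrayXOR : Prop := ∀ (arr : List Int) (k : Int), Dom_maxSubarrayXOR arr k → Pre_maxSubarrayXOR arr k → Spec_maxSubarrayXOR arr k (maxSubarrayXOR arr k)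

-- ===== LEMMAS AND PROOFS =====

theorem pvBxor_oo (m n : Nat) : PySem.Int.bxor (Int.ofNat m) (Int.ofNat n) = Int.ofNat (m ^^^ n) := by
  simp [PySem.Int.bxor]

theorem pvBxor_on (m n : Nat) : PySem.Int.bxor (Int.ofNat m) (Int.negSucc n) = Int.negSucc (m ^^^ n) := by
  have : (Int.negSucc n) = -(n : Int) - 1 := by simp [Int.negSucc_eq]; ring
  simp [PySem.Int.bxor, this]; omega

theorem pvBxor_no (m n : Nat) : PySem.Int.bxor (Int.negSucc m) (Int.ofNat n) = Int.negSucc (m ^^^ n) := by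
  have h1 : (Int.negSucc m) = -(m : Int) - 1 := by simp [Int.negSucc_eq]; ring
  have h2 : (Int.negSucc (m ^^^ n)) = -((m ^^^ n : Nat) : Int) - 1 := by simp [Int.negSucc_eq]; ring
  simp [PySem.Int.bxor, h1, h2]; omega

theorem pvBxor_nn (m n : Nat) : PySem.Int.bxor (Int.negSucc m) (Int.negSucc n) = Int.ofNat (m ^^^ n) := by
  have h1 : (Int.negSucc m) = -(m : Int) - 1 := by simp [Int.negSucc_eq]; ring
  have h2 : (Int.negSucc n) = -(n : Int) - 1 := by simp [Int.negSucc_eq]; ring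
  simp [PySem.Int.bxor, h1, h2]; omega

theorem pvBxor_assoc (a b c : Int) :
    PySem.Int.bxor (PySem.Int.bxor a b) c = PySem.Int.bxor a (PySem.Int.bxor b c) := by
  rcases a with a | a <;> rcases b with b | b <;> rcases c with c | c <;>
    simp only [pvBxor_oo, pvBxor_on, pvBxor_no, pvBxor_nn, Nat.xor_assoc]

-- ((a⊕b)⊕c)⊕d = (a⊕d)⊕(b⊕c) — the rolling-window identity
theorem pvBxor_four (a b c d : Int) :
    PySem.Int.bxor (PySem.Int.bxor (PySem.Int.bxor a b) c) d
      = PySem.Int.bxor (PySem.Int.bxor a d) (PySem.Int.bxor b c) := by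
  rw [pvBxor_assoc a b c, PySem.Int.bxor_comm a (PySem.Int.bxor b c), pvBxor_assoc, PySem.Int.bxor_comm (PySem.Int.bxor b c)]

-- prefix xor of the first j elements
def pvPre (arr : List Int) (j : Nat) : Int := (arr.take j).foldl PySem.Int.bxor 0

-- xor of the window of length k' starting at t
def pvWin (arr : List Int) (k' t : Nat) : Int := PySem.Int.bxor (pvPre arr (t + k')) (pvPre arr t)

theorem pvPre_succ (arr : List Int) (j : Nat) (h : j < arr.length) :
    pvPre arr (j + 1) = PySem.Int.bxor (pvPre arr j) (arr.getD j 0) := by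
  rw [pvPre, List.take_add_one, List.getElem?_eq_getElem h, Option.toList_some, List.foldl_append,
    List.getD_eq_getElem arr 0 h]
  rfl

theorem pvFoldl_range_getD (xs : List Int) (f : Int → Int → Int) :
    ∀ (j : Nat) (init : Int), j ≤ xs.length →
      (List.range j).foldl (fun c t => f c (xs.getD t 0)) init = (xs.take j).foldl f init := by
  intro j
  induction j with
  | zero => simp
  | succ j ih =>
    intro init h
    have hj : j < xs.length := by omega
    rw [List.range_succ, List.foldl_append, ih init (by omega), List.take_add_one,
      List.getElem?_eq_getElem hj, Option.toList_some, List.foldl_append]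
    simp [List.getD, List.getElem?_eq_getElem hj]

-- the prefix-xor list built by B's first loop
def pvPf (l : List Int) : List Int :=
  l.foldl (fun P x => P ++ [PySem.Int.bxor (PySem.List.pyGetD P (-1) 0) x]) [0]

theorem pvPf_length (l : List Int) : (pvPf l).length = l.length + 1 := by
  induction l using List.reverseRecOn with
  | nil => rfl
  | append_singleton l x ih => simp [pvPf, List.foldl_append] at *; omega

theorem pvPf_getD (l : List Int) : ∀ j : Nat, j ≤ l.length → (pvPf l).getD j 0 = pvPre l j := by
  induction l using List.reverseRecOn with
  | nil =>
    intro j h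
    simp at h
    subst h
    rfl
  | append_singleton l x ih =>
    intro j h
    have hlen := pvPf_length l
    have hne : pvPf l ≠ [] := by intro h0; rw [h0] at hlen; simp at hlen
    have hlast : PySem.List.pyGetD (pvPf l) (-1) 0 = pvPre l l.length := by
      rw [PySem.List.pyGetD_neg_one (pvPf l) 0 hne, List.getLast_eq_getElem]
      simp only [hlen, Nat.add_sub_cancel]
      rw [← List.getD_eq_getElem (pvPf l) 0 (by omega)]
      exact ih l.length le_rfl
    have hPf : pvPf (l ++ [x])
        = pvPf l ++ [PySem.Int.bxor (PySem.List.pyGetD (pvPf l) (-1) 0) x] := by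
      show List.foldl _ [0] (l ++ [x]) = _
      rw [List.foldl_append]
      rfl
    rw [hPf, hlast]
    by_cases hj : j ≤ l.length
    · rw [List.getD_append _ _ _ _ (by omega), ih j hj, pvPre, pvPre,
        List.take_append_of_le_length hj]
    · have hj' : j = l.length + 1 := by simp at h; omega
      subst hj'
      rw [List.getD_append_right _ _ _ _ (by omega)]
      simp only [hlen, Nat.sub_self, List.getD_cons_zero]
      rw [pvPre, List.take_of_length_le (by simp), pvPre,
        List.take_of_length_le (by simp), List.foldl_append]
      rfl

-- A's second loop, reindexed over List.range, computes (window m , running max of windows 1..m)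
theorem pvMainA (arr : List Int) (k' : Nat) :
    ∀ (m : Nat) (b : Int), k' + m ≤ arr.length →
      (List.range m).foldl
        (fun (st : Int × Int) t =>
          let c := PySem.Int.bxor (PySem.Int.bxor st.1 (arr.getD t 0)) (arr.getD (k' + t) 0)
          (c, max st.2 c)) (pvWin arr k' 0, b)
      = (pvWin arr k' m, (List.range m).foldl (fun bb t => max bb (pvWin arr k' (t + 1))) b) := by
  intro m
  induction m with
  | zero => simp
  | succ m ih =>
    intro b h
    rw [List.range_succ, List.foldl_append, List.foldl_append, ih b (by omega)]
    have hm : m < arr.length := by omega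
    have hmk : k' + m < arr.length := by omega
    have hwin : PySem.Int.bxor (PySem.Int.bxor (pvWin arr k' m) (arr.getD m 0)) (arr.getD (k' + m) 0)
        = pvWin arr k' (m + 1) := by
      have e1 : m + 1 + k' = m + k' + 1 := by omega
      have e2 : k' + m = m + k' := by omega
      simp only [pvWin]
      rw [pvBxor_four, e1, pvPre_succ arr (m + k') (by omega), pvPre_succ arr m hm, e2]
    simp only [List.foldl_cons, List.foldl_nil, hwin]

-- ===== VERDICT (by name: the statement is the Claim_ definition above) =====
theorem maxSubarrayXOR_spec : Claim_equal_maxSubarrayXOR := by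
  intro arr k _ hpre
  obtain ⟨k', rfl⟩ : ∃ k' : Nat, k = (k' : Int) := ⟨k.toNat, by have := hpre.1; omega⟩
  have hk'len : k' ≤ arr.length := by exact_mod_cast hpre.2
  unfold Spec_maxSubarrayXOR maxSubarrayXOR maxSubarrayXOR_alt
  dsimp only
  have hm : ((arr.length : Int) - (k' : Int)).toNat = arr.length - k' := by omega
  have hw0 : pvWin arr k' 0 = pvPre arr k' := by
    simp [pvWin, pvPre]
  -- A's first loop computes the prefix xor of the first k' elements
  have h1 : (PySem.List.pyRange 0 (k' : Int) 1).foldl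
      (fun c i => PySem.Int.bxor c (PySem.List.pyGetD arr i 0)) 0 = pvPre arr k' := by
    rw [PySem.List.pyRange_one, List.foldl_map]
    simp only [sub_zero, Int.toNat_natCast, zero_add, PySem.List.pyGetD_natCast]
    exact pvFoldl_range_getD arr PySem.Int.bxor k' 0 hk'len
  rw [h1]
  -- A's second loop, as a fold over List.range (arr.length - k')
  have h2 : (PySem.List.pyRange (k' : Int) (arr.length : Int) 1).foldl
      (fun (st : Int × Int) i =>
        ((PySem.Int.bxor (PySem.Int.bxor st.1 (PySem.List.pyGetD arr (i - (k' : Int)) 0))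
            (PySem.List.pyGetD arr i 0)),
          max st.2 (PySem.Int.bxor (PySem.Int.bxor st.1 (PySem.List.pyGetD arr (i - (k' : Int)) 0))
            (PySem.List.pyGetD arr i 0)))) (pvPre arr k', pvPre arr k')
      = (pvWin arr k' (arr.length - k'),
          (List.range (arr.length - k')).foldl
            (fun bb t => max bb (pvWin arr k' (t + 1))) (pvPre arr k')) := by
    rw [PySem.List.pyRange_one, List.foldl_map, hm]
    have hfun : (fun (st : Int × Int) (t : Nat) =>
        ((PySem.Int.bxor (PySem.Int.bxor st.1 (PySem.List.pyGetD arr ((k' : Int) + (t : Int) - (k' : Int)) 0))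
            (PySem.List.pyGetD arr ((k' : Int) + (t : Int)) 0)),
          max st.2 (PySem.Int.bxor (PySem.Int.bxor st.1 (PySem.List.pyGetD arr ((k' : Int) + (t : Int) - (k' : Int)) 0))
            (PySem.List.pyGetD arr ((k' : Int) + (t : Int)) 0))))
        = (fun (st : Int × Int) (t : Nat) =>
            ((PySem.Int.bxor (PySem.Int.bxor st.1 (arr.getD t 0)) (arr.getD (k' + t) 0)),
              max st.2 (PySem.Int.bxor (PySem.Int.bxor st.1 (arr.getD t 0)) (arr.getD (k' + t) 0)))) := by
      funext st t
      simp only [add_sub_cancel_left]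
      simp only [← Nat.cast_add, PySem.List.pyGetD_natCast]
    rw [hfun, show (pvPre arr k', pvPre arr k') = (pvWin arr k' 0, pvPre arr k') by rw [hw0]]
    exact pvMainA arr k' (arr.length - k') (pvPre arr k') (by omega)
  rw [h2]
  -- B's prefix list is pvPf arr, and its lookups are prefix xors
  have hP : arr.foldl (fun P x => P ++ [PySem.Int.bxor (PySem.List.pyGetD P (-1) 0) x]) [0] = pvPf arr := rfl
  rw [hP]
  have hbest : PySem.Int.bxor (PySem.List.pyGetD (pvPf arr) (k' : Int) 0)
      (PySem.List.pyGetD (pvPf arr) 0 0) = pvPre arr k' := by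
    rw [PySem.List.pyGetD_natCast, PySem.List.pyGetD_zero, pvPf_getD arr k' hk'len,
      pvPf_getD arr 0 (by omega)]
    simp [pvPre]
  rw [hbest]
  -- B's loop over window starts 1 .. n-k'
  have hmm : ((arr.length : Int) - (k' : Int) + 1 - 1).toNat = arr.length - k' := by omega
  rw [PySem.List.pyRange_one, List.foldl_map, hmm]
  have h3 : ∀ (b : Int), ∀ t ∈ List.range (arr.length - k'),
      max b (PySem.Int.bxor (PySem.List.pyGetD (pvPf arr) (1 + (t : Int) + (k' : Int)) 0)
        (PySem.List.pyGetD (pvPf arr) (1 + (t : Int)) 0))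
      = max b (pvWin arr k' (t + 1)) := by
    intro b t ht
    have ht' : t < arr.length - k' := List.mem_range.mp ht
    have e1 : (1 : Int) + (t : Int) + (k' : Int) = ((t + 1 + k' : Nat) : Int) := by push_cast; ring
    have e2 : (1 : Int) + (t : Int) = ((t + 1 : Nat) : Int) := by push_cast; ring
    rw [e1, e2, PySem.List.pyGetD_natCast, PySem.List.pyGetD_natCast,
      pvPf_getD arr (t + 1 + k') (by omega), pvPf_getD arr (t + 1) (by omega)]
    rfl
  rw [List.foldl_ext _ _ _ h3]
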